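-- pv_equiv track=rewrite | github.com/PizzaPoot/Pyhon-II-kursus | 3.3b.py | on_bingo_tabel_extra
-- ===== SOURCE A (Python) =====
-- def on_bingo_tabel_extra(matrix):
--     arvud = []
--     for rida in matrix:
--         for i, arv in enumerate(rida):
--             if i * 15 < arv <= (i + 1) * 15 and arv not in arvud:
--                 arvud.append(arv)
--             else:
--                 return False
--     return True
-- ===== SOURCE B (Python) =====
-- def on_bingo_tabel_extra(matrix):
--     if not all(i * 15 < arv <= (i + 1) * 15 for rida in matrix for i, arv in enumerate(rida)):
--         return False
--     flat = [arv for rida in matrix for arv in rida]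
--     return len(flat) == len(set(flat))
-- ===== Notes on version B (the rewrite author's own statement) =====
-- stated objective: simpler
-- what changed: Replaces A's single fused loop with an incremental 'seen' list and per-element early return by two global passes: one range check over all enumerated cells, then a whole-table uniqueness test by comparing the flat list's length with its set's size.
import Mathlib
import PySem

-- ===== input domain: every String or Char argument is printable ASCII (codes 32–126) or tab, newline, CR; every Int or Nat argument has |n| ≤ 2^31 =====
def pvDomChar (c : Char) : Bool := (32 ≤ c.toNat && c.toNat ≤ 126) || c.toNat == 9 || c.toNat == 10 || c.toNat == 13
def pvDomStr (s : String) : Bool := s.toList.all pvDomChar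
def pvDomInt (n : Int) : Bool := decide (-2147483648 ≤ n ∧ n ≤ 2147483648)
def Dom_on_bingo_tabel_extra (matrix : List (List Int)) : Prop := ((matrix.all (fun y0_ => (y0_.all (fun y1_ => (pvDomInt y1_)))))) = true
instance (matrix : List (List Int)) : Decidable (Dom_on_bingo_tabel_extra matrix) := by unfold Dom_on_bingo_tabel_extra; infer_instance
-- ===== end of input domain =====

-- B replaces A's fused early-return loop with a 'seen' list by two global passes
-- (range check over enumerated cells, then a flat-list-vs-set size comparison); objective: simpler.

-- ===== PORT A =====
-- inner loop: 'for i, arv in enumerate(rida)': append to arvud or return False (modelled as none)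
def pvA_row : List Int → Int → List Int → Option (List Int)
  | [], _, arvud => some arvud
  | arv :: rest, i, arvud =>
    if i * 15 < arv ∧ arv ≤ (i + 1) * 15 ∧ arv ∉ arvud then
      pvA_row rest (i + 1) (arvud ++ [arv])
    else
      none

-- outer loop: 'for rida in matrix'
def pvA_rows : List (List Int) → List Int → Bool
  | [], _ => true
  | rida :: rest, arvud =>
    match pvA_row rida 0 arvud with
    | some arvud' => pvA_rows rest arvud'
    | none => false

def on_bingo_tabel_extra (matrix : List (List Int)) : Bool :=
  pvA_rows matrix []

-- ===== PORT B =====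
def on_bingo_tabel_extra_alt (matrix : List (List Int)) : Bool :=
  if ¬ (matrix.all (fun rida =>
        (PySem.List.enumerate rida 0).all (fun p =>
          decide (p.1 * 15 < p.2 ∧ p.2 ≤ (p.1 + 1) * 15)))) then
    false
  else
    let flat := matrix.flatMap (fun rida => rida)
    flat.length == (PySem.Set.ofList flat).length

-- ===== PRECONDITION & SPEC =====
def Spec_on_bingo_tabel_extra (matrix : List (List Int)) (out : Bool) : Prop := out = on_bingo_tabel_extra_alt matrix
instance (matrix : List (List Int)) (out : Bool) : Decidable (Spec_on_bingo_tabel_extra matrix out) := by unfold Spec_on_bingo_tabel_extra; infer_instance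

-- ===== CLAIM (what is proved, stated in full; the proofs are below) =====
def Claim_equal_on_bingo_tabel_extra : Prop := ∀ (matrix : List (List Int)), Dom_on_bingo_tabel_extra matrix → Spec_on_bingo_tabel_extra matrix (on_bingo_tabel_extra matrix)

-- ===== LEMMAS AND PROOFS =====

/-- Row-wise range condition, indices counted from `s`. -/
def pvRangeOk (s : Int) : List Int → Bool
  | [] => true
  | a :: rest => (decide (s * 15 < a ∧ a ≤ (s + 1) * 15)) && pvRangeOk (s + 1) rest

theorem pvEnumAll (rida : List Int) (s : Int) :
    (PySem.List.enumerate rida s).all (fun p =>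
        decide (p.1 * 15 < p.2 ∧ p.2 ≤ (p.1 + 1) * 15)) = pvRangeOk s rida := by
  induction rida generalizing s with
  | nil => simp [pvRangeOk]
  | cons a rest ih =>
      simp only [PySem.List.enumerate_cons, List.all_cons, ih, pvRangeOk]

theorem pvRowSpec (rida : List Int) (s : Int) (arvud : List Int) (h : arvud.Nodup) :
    pvA_row rida s arvud =
      if pvRangeOk s rida = true ∧ (arvud ++ rida).Nodup then some (arvud ++ rida) else none := by
  induction rida generalizing s arvud with
  | nil => simp [pvA_row, pvRangeOk, h]
  | cons a rest ih =>
      by_cases hc : s * 15 < a ∧ a ≤ (s + 1) * 15 ∧ a ∉ arvud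
      · have hnd : (arvud ++ [a]).Nodup := by
          rw [List.nodup_append]
          refine ⟨h, List.nodup_singleton a, ?_⟩
          intro y hy b hb
          simp at hb; subst hb
          exact fun he => hc.2.2 (he ▸ hy)
        rw [pvA_row, if_pos hc, ih (s + 1) (arvud ++ [a]) hnd]
        by_cases h2 : pvRangeOk (s + 1) rest = true ∧ (arvud ++ [a] ++ rest).Nodup
        · rw [if_pos h2, if_pos]
          · simp
          · constructor
            · simp [pvRangeOk, hc.1, hc.2.1, h2.1]
            · simpa using h2.2
        · rw [if_neg h2, if_neg]
          intro h3
          have hro := h3.1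
          simp only [pvRangeOk, Bool.and_eq_true, decide_eq_true_eq] at hro
          exact h2 ⟨hro.2, by simpa using h3.2⟩
      · rw [pvA_row, if_neg hc, if_neg]
        intro h3
        push Not at hc
        by_cases hr : s * 15 < a
        · by_cases hu : a ≤ (s + 1) * 15
          · have hm : a ∈ arvud := hc hr hu
            have hn := h3.2
            rw [List.nodup_append] at hn
            exact hn.2.2 a hm a (by simp) rfl
          · have hro := h3.1
            simp only [pvRangeOk, Bool.and_eq_true, decide_eq_true_eq] at hro
            exact hu hro.1.2
        · have hro := h3.1
          simp only [pvRangeOk, Bool.and_eq_true, decide_eq_true_eq] at hro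
          exact hr hro.1.1

theorem pvRowsSpec (matrix : List (List Int)) (arvud : List Int) (h : arvud.Nodup) :
    pvA_rows matrix arvud =
      (matrix.all (pvRangeOk 0) && decide (arvud ++ matrix.flatMap (fun rida => rida)).Nodup) := by
  induction matrix generalizing arvud with
  | nil => simp [pvA_rows, h]
  | cons rida rest ih =>
      rw [pvA_rows, pvRowSpec rida 0 arvud h]
      by_cases hc : pvRangeOk 0 rida = true ∧ (arvud ++ rida).Nodup
      · rw [if_pos hc]
        show pvA_rows rest (arvud ++ rida) = _
        rw [ih (arvud ++ rida) hc.2]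
        simp [hc.1, List.append_assoc]
      · rw [if_neg hc]
        by_cases hr : pvRangeOk 0 rida = true
        · have hnd : ¬ (arvud ++ rida).Nodup := fun hn => hc ⟨hr, hn⟩
          have hnot : ¬ (arvud ++ List.flatMap (fun rida => rida) (rida :: rest)).Nodup := by
            intro hn
            exact hnd (hn.sublist (by
              simp only [List.flatMap_cons, ← List.append_assoc]
              exact List.sublist_append_left _ _))
          rw [decide_eq_false hnot]
          simp
        · simp [hr, List.all_cons]

theorem pvAddLenLe (xs : List Int) (s : List Int) :
    (List.foldl PySem.Set.add s xs).length ≤ s.length + xs.length := by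
  induction xs generalizing s with
  | nil => simp
  | cons x rest ih =>
      have h1 := ih (PySem.Set.add s x)
      have hadd : (PySem.Set.add s x).length ≤ s.length + 1 := by
        unfold PySem.Set.add
        split <;> simp
      simp only [List.foldl_cons, List.length_cons]
      omega

theorem pvFoldLenIff (xs : List Int) (s : List Int) (h : s.Nodup) :
    (List.foldl PySem.Set.add s xs).length = s.length + xs.length ↔ (s ++ xs).Nodup := by
  induction xs generalizing s with
  | nil => simp [h]
  | cons x rest ih =>
      simp only [List.foldl_cons, List.length_cons]
      by_cases hx : x ∈ s
      · have hadd : PySem.Set.add s x = s := by simp [PySem.Set.add, hx]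
        rw [hadd]
        constructor
        · intro hlen
          exfalso
          have := pvAddLenLe rest s
          omega
        · intro hn
          exfalso
          rw [List.nodup_append] at hn
          exact hn.2.2 x hx x (by simp) rfl
      · have hadd : PySem.Set.add s x = s ++ [x] := by simp [PySem.Set.add, hx]
        have hnd : (s ++ [x]).Nodup := by
          rw [List.nodup_append]
          refine ⟨h, List.nodup_singleton x, ?_⟩
          intro y hy b hb
          simp at hb; subst hb
          exact fun he => hx (he ▸ hy)
        rw [hadd]
        constructor
        · intro hlen
          have h1 : (List.foldl PySem.Set.add (s ++ [x]) rest).length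
              = (s ++ [x]).length + rest.length := by
            simp only [List.length_append, List.length_cons, List.length_nil]
            omega
          have := (ih (s ++ [x]) hnd).1 h1
          simpa using this
        · intro hn
          have h1 := (ih (s ++ [x]) hnd).2 (by simpa using hn)
          simp only [List.length_append, List.length_cons, List.length_nil] at h1
          omega

theorem pvOfListLenIff (xs : List Int) :
    (PySem.Set.ofList xs).length = xs.length ↔ xs.Nodup := by
  have := pvFoldLenIff xs [] List.nodup_nil
  simpa [PySem.Set.ofList_eq_foldl] using this

theorem pvMain (matrix : List (List Int)) :
    on_bingo_tabel_extra matrix = on_bingo_tabel_extra_alt matrix := by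
  unfold on_bingo_tabel_extra on_bingo_tabel_extra_alt
  rw [pvRowsSpec matrix [] List.nodup_nil]
  simp only [List.nil_append, pvEnumAll]
  by_cases hall : matrix.all (pvRangeOk 0) = true
  · rw [hall, if_neg (by simp)]
    show (true && decide (matrix.flatMap (fun rida => rida)).Nodup)
        = ((matrix.flatMap (fun rida => rida)).length
            == (PySem.Set.ofList (matrix.flatMap (fun rida => rida))).length)
    set flat := matrix.flatMap (fun rida => rida) with hf
    by_cases hnd : flat.Nodup
    · have hlen := (pvOfListLenIff flat).2 hnd
      simp [hnd, hlen]
    · have hne : (PySem.Set.ofList flat).length ≠ flat.length :=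
        fun he => hnd ((pvOfListLenIff flat).1 he)
      simp only [Bool.true_and, decide_eq_false hnd]
      symm
      rw [beq_eq_false_iff_ne]
      exact fun he => hne he.symm
  · rw [Bool.not_eq_true] at hall
    rw [hall, if_pos (by simp)]
    simp

-- ===== VERDICT (by name: the statement is the Claim_ definition above) =====
theorem on_bingo_tabel_extra_spec : Claim_equal_on_bingo_tabel_extra := by
  intro matrix _
  unfold Spec_on_bingo_tabel_extra
  exact pvMain matrix
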